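-- pv_equiv track=rewrite | github.com/KWIC-Algorithm-Study/Problem-Solving | programmers_12938.py | solution
-- ===== SOURCE A (Python) =====
-- def solution(n, s):
--     if s<n:
--         return [-1]
--
--     elif s%n==0:
--         return [s//n]*n
--
--     else:
--         lst=[]
--         for i in range(n,0,-1):
--             x=s//i
--             lst.append(x)
--             s-=x
--         return lst
-- ===== SOURCE B (Python) =====
-- def solution(n, s):
--     if s < n:
--         return [-1]
--     q, r = divmod(s, n)
--     return [q] * (n - r) + [q + 1] * r
-- ===== Notes on version B (the rewrite author's own statement) =====
-- stated objective: simpler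
-- what changed: Replaces the greedy per-element s//i loop (and the separate s%n==0 branch) with the closed-form remainder distribution [q]*(n-r)+[q+1]*r from a single divmod.
import Mathlib
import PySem

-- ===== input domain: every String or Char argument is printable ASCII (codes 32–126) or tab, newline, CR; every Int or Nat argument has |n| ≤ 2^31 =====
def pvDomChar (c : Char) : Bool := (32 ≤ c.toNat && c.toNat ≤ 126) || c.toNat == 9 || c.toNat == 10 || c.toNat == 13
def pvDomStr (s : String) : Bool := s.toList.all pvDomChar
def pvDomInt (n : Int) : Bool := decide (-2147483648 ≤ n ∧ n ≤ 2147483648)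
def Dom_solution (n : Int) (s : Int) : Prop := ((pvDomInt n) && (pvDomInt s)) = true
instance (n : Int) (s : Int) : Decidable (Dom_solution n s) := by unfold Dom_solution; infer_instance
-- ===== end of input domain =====

-- B replaces A's greedy per-element s//i loop with the closed-form remainder
-- distribution [q]*(n-r)+[q+1]*r from one divmod (objective: simpler).

-- ===== PORT A =====
def solution (n : Int) (s : Int) : List Int :=
  if s < n then [-1]
  else if PySem.Int.mod s n = 0 then
    List.replicate n.toNat (PySem.Int.floordiv s n)
  else
    ((PySem.List.pyRange n 0 (-1)).foldl
      (fun (st : List Int × Int) i =>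
        let x := PySem.Int.floordiv st.2 i
        (st.1 ++ [x], st.2 - x)) ([], s)).1

-- ===== PORT B =====
def solution_alt (n : Int) (s : Int) : List Int :=
  if s < n then [-1]
  else
    let q := PySem.Int.floordiv s n
    let r := PySem.Int.mod s n
    List.replicate (n - r).toNat q ++ List.replicate r.toNat (q + 1)

-- ===== PRECONDITION & SPEC =====
-- Pre_ excludes exactly n = 0 ∧ 0 ≤ s, where A (s % n) raises ZeroDivisionError
-- (B's divmod raises there too).
def Pre_solution (n : Int) (s : Int) : Prop := n ≠ 0 ∨ s < 0
instance (n : Int) (s : Int) : Decidable (Pre_solution n s) := by unfold Pre_solution; infer_instance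
def pvWitness_solution : Int × Int := (3, 11)

def Spec_solution (n : Int) (s : Int) (out : List Int) : Prop := out = solution_alt n s
instance (n : Int) (s : Int) (out : List Int) : Decidable (Spec_solution n s out) := by unfold Spec_solution; infer_instance

-- ===== CLAIM (what is proved, stated in full; the proofs are below) =====
def Claim_equal_solution : Prop := ∀ (n : Int) (s : Int), Dom_solution n s → Pre_solution n s → Spec_solution n s (solution n s)

-- ===== LEMMAS AND PROOFS =====

-- the loop body of A's port, named for the proofs
def pvStep (st : List Int × Int) (i : Int) : List Int × Int :=
  let x := PySem.Int.floordiv st.2 i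
  (st.1 ++ [x], st.2 - x)

lemma foldl_pvStep_prefix (l : List Int) (acc : List Int) (s : Int) :
    l.foldl pvStep (acc, s)
      = (acc ++ (l.foldl pvStep ([], s)).1, (l.foldl pvStep ([], s)).2) := by
  induction l generalizing acc s with
  | nil => simp
  | cons x t ih =>
    simp only [List.foldl_cons, pvStep, List.nil_append]
    rw [ih (acc ++ [_]), ih [_]]
    simp

-- greedy loop over range(k,0,-1) equals the remainder distribution
lemma loop_eq (k : Nat) (hk : 0 < k) (s : Int) :
    ((PySem.List.pyRange (k : Int) 0 (-1)).foldl pvStep ([], s)).1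
      = List.replicate ((k : Int) - PySem.Int.mod s k).toNat (PySem.Int.floordiv s k)
        ++ List.replicate (PySem.Int.mod s k).toNat (PySem.Int.floordiv s k + 1) := by
  induction k generalizing s with
  | zero => omega
  | succ m ih =>
    have hkpos : (0 : Int) < ((m + 1 : Nat) : Int) := by exact_mod_cast hk
    rw [PySem.List.pyRange_neg_one_cons (by omega)]
    set q := PySem.Int.floordiv s ((m + 1 : Nat) : Int) with hq
    set r := PySem.Int.mod s ((m + 1 : Nat) : Int) with hr
    have hsum : q * ((m + 1 : Nat) : Int) + r = s := PySem.Int.floordiv_mul_add_mod _ _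
    have hr0 : 0 ≤ r := PySem.Int.mod_nonneg _ hkpos
    have hrlt : r < ((m + 1 : Nat) : Int) := PySem.Int.mod_lt _ hkpos
    simp only [List.foldl_cons, pvStep, ← hq]
    rw [foldl_pvStep_prefix]
    have hstep : ((m + 1 : Nat) : Int) - 1 = (m : Int) := by push_cast; ring
    rcases Nat.eq_zero_or_pos m with hm | hm
    · subst hm
      have : r = 0 := by omega
      simp [PySem.List.pyRange_neg_one_eq_nil, this]
    · have hmpos : (0 : Int) < (m : Int) := by exact_mod_cast hm
      rw [hstep, ih hm (s - q)]
      -- arithmetic facts about the recursive quotient/remainder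
      have hsq : s - q = q * (m : Int) + r := by push_cast at hsum ⊢; linarith
      by_cases hrc : r < (m : Int)
      · have hq' : PySem.Int.floordiv (s - q) (m : Int) = q := by
          rw [PySem.Int.floordiv_eq_iff_of_pos hmpos]
          constructor <;> [linarith [hsq]; nlinarith [hsq]]
        have hr' : PySem.Int.mod (s - q) (m : Int) = r := by
          have h := PySem.Int.floordiv_mul_add_mod (s - q) (m : Int)
          rw [hq'] at h; linarith [hsq]
        rw [hq', hr']
        have h1 : (((m + 1 : Nat) : Int) - r).toNat = ((m : Int) - r).toNat + 1 := by omega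
        rw [h1, List.replicate_succ]
        simp
      · have hreq : r = (m : Int) := by omega
        have hq' : PySem.Int.floordiv (s - q) (m : Int) = q + 1 := by
          rw [PySem.Int.floordiv_eq_iff_of_pos hmpos]
          constructor <;> nlinarith [hsq]
        have hr' : PySem.Int.mod (s - q) (m : Int) = 0 := by
          have h := PySem.Int.floordiv_mul_add_mod (s - q) (m : Int)
          rw [hq'] at h; nlinarith [hsq]
        rw [hq', hr']
        have h1 : (((m + 1 : Nat) : Int) - r).toNat = 1 := by omega
        have h2 : r.toNat = ((m : Int) - 0).toNat := by omega
        rw [h1, h2]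
        simp [List.replicate_succ]

-- ===== VERDICT (by name: the statement is the Claim_ definition above) =====
theorem solution_spec : Claim_equal_solution := by
  intro n s _ hpre
  unfold Spec_solution solution solution_alt
  by_cases hlt : s < n
  · simp [hlt]
  · simp only [if_neg hlt]
    have hn0 : n ≠ 0 := by
      rcases hpre with h | h
      · exact h
      · intro h0; subst h0; omega
    by_cases hnpos : 0 < n
    · -- positive n: both sides equal the remainder distribution
      obtain ⟨k, hk⟩ : ∃ k : Nat, n = (k : Int) := ⟨n.toNat, by omega⟩
      subst hk
      have hkpos : 0 < k := by exact_mod_cast hnpos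
      have hmain := loop_eq k hkpos s
      by_cases hmod : PySem.Int.mod s (k : Int) = 0
      · simp only [hmod] at *
        simp
      · simp only [if_neg hmod]
        show ((PySem.List.pyRange (k : Int) 0 (-1)).foldl pvStep ([], s)).1 = _
        rw [hmain]
    · -- negative n: A's range is empty / replicate count ≤ 0, B's counts ≤ 0: both []
      have hnneg : n < 0 := by omega
      have hr := PySem.Int.mod_neg_bounds s hnneg
      by_cases hmod : PySem.Int.mod s n = 0
      · simp only [hmod]
        have h1 : n.toNat = 0 := by omega
        simp [h1]
      · simp only [if_neg hmod]
        have hmne : PySem.Int.mod s n ≠ 0 := hmod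
        have h1 : (n - PySem.Int.mod s n).toNat = 0 := by omega
        have h2 : (PySem.Int.mod s n).toNat = 0 := by omega
        show ((PySem.List.pyRange n 0 (-1)).foldl pvStep ([], s)).1 = _
        rw [PySem.List.pyRange_neg_one_eq_nil (by omega)]
        simp [h1, h2]
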